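-- pv_equiv track=rewrite | github.com/gotwalt/chronicle | eval/judge.py | _truncate_diff
-- ===== SOURCE A (Python) =====
-- def _truncate_diff(diff: str, max_chars: int) -> str:
--     """Truncate diff to max_chars, filtering .claude/ setup noise first."""
--     lines = diff.split("\n")
--     filtered = []
--     skip = False
--     for line in lines:
--         # Skip diffs for .claude/ files (setup noise)
--         if line.startswith("diff --git") and "/.claude/" in line:
--             skip = True
--             continue
--         if line.startswith("diff --git") and "/.claude/" not in line:
--             skip = False
--         if not skip:
--             filtered.append(line)
--
--     result = "\n".join(filtered)
--     if len(result) > max_chars: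
--         return result[:max_chars] + "\n... [truncated]"
--     return result
-- ===== SOURCE B (Python) =====
-- def _truncate_diff(diff: str, max_chars: int) -> str:
--     """Truncate diff to max_chars, filtering .claude/ setup noise first.
--
--     Group-then-filter: split lines into blocks at 'diff --git' headers,
--     drop blocks whose header mentions '/.claude/', keep the rest.
--     """
--     lines = diff.split("\n")
--     blocks = []
--     current = []  # leading block (lines before the first header)
--     for line in lines:
--         if line.startswith("diff --git"):
--             blocks.append(current)
--             current = [line]
--         else:
--             current.append(line)
--     blocks.append(current)
--
--     filtered = []
--     for block in blocks:
--         if not (block and block[0].startswith("diff --git") and "/.claude/" in block[0]):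
--             filtered.extend(block)
--
--     result = "\n".join(filtered)
--     if len(result) > max_chars:
--         return result[:max_chars] + "\n... [truncated]"
--     return result
-- ===== Notes on version B (the rewrite author's own statement) =====
-- stated objective: alternative
-- what changed: Replaced the per-line skip-flag state machine by an explicit group-then-filter structure: lines are partitioned into blocks at 'diff --git' headers, blocks whose header contains '/.claude/' are dropped, and the rest are concatenated before the same truncation step.
import Mathlib
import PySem

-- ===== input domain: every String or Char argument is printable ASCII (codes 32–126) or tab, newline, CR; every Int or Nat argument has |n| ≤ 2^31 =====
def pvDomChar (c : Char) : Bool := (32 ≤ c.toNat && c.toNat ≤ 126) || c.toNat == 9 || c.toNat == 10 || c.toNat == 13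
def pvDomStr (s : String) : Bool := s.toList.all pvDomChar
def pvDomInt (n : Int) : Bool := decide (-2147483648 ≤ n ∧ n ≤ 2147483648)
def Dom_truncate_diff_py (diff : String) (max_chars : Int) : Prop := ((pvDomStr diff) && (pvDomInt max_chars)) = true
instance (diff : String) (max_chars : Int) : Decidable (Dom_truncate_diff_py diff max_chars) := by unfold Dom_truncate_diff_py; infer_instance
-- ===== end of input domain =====

-- B replaces A's per-line skip-flag state machine by a group-into-blocks-then-filter decomposition (alternative, same cost).

-- ===== PORT A =====
-- loop body of A: state (filtered, skip)
def tdStepA (acc : List String × Bool) (line : String) : List String × Bool :=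
  if PySem.Str.startswith line "diff --git" && PySem.Str.isIn "/.claude/" line then
    (acc.1, true)                     -- skip = True; continue
  else
    let skip := if PySem.Str.startswith line "diff --git" && !(PySem.Str.isIn "/.claude/" line) then false else acc.2
    if !skip then (acc.1 ++ [line], skip) else (acc.1, skip)

def truncate_diff_py (diff : String) (max_chars : Int) : String :=
  let lines := (PySem.Str.split? diff "\n").getD []
  let st := lines.foldl tdStepA ([], false)
  let result := PySem.Str.join "\n" st.1
  if PySem.Str.len result > max_chars then
    PySem.Str.slice result none (some max_chars) ++ "\n... [truncated]"
  else result

-- ===== PORT B =====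
-- block is .claude setup noise: starts with a 'diff --git' header mentioning '/.claude/'
def tdClaudeBlock (block : List String) : Bool :=
  match block with
  | [] => false
  | h :: _ => PySem.Str.startswith h "diff --git" && PySem.Str.isIn "/.claude/" h

-- grouping loop body of B: state (blocks, current)
def tdStepB (acc : List (List String) × List String) (line : String) : List (List String) × List String :=
  if PySem.Str.startswith line "diff --git" then (acc.1 ++ [acc.2], [line])
  else (acc.1, acc.2 ++ [line])

def truncate_diff_py_alt (diff : String) (max_chars : Int) : String :=
  let lines := (PySem.Str.split? diff "\n").getD []
  let st := lines.foldl tdStepB ([], [])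
  let blocks := st.1 ++ [st.2]
  let filtered := blocks.foldl (fun acc block => if tdClaudeBlock block then acc else acc ++ block) []
  let result := PySem.Str.join "\n" filtered
  if PySem.Str.len result > max_chars then
    PySem.Str.slice result none (some max_chars) ++ "\n... [truncated]"
  else result

-- ===== PRECONDITION & SPEC =====
def Spec_truncate_diff_py (diff : String) (max_chars : Int) (out : String) : Prop := out = truncate_diff_py_alt diff max_chars
instance (diff : String) (max_chars : Int) (out : String) : Decidable (Spec_truncate_diff_py diff max_chars out) := by unfold Spec_truncate_diff_py; infer_instance

-- ===== CLAIM (what is proved, stated in full; the proofs are below) =====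
def Claim_equal_truncate_diff_py : Prop := ∀ (diff : String) (max_chars : Int), Dom_truncate_diff_py diff max_chars → Spec_truncate_diff_py diff max_chars (truncate_diff_py diff max_chars)

-- ===== LEMMAS AND PROOFS =====
-- a block's contribution to B's filtered line list
def tdG (b : List String) : List String := if tdClaudeBlock b then [] else b

lemma tdClaudeBlock_append (cur : List String) (line : String) :
    tdClaudeBlock (cur ++ [line]) =
      (match cur with | [] => tdClaudeBlock [line] | _ => tdClaudeBlock cur) := by
  cases cur <;> simp [tdClaudeBlock]

-- the inner filter loop of B is a flatMap of tdG
lemma tdFilter_eq_flatMap (bs : List (List String)) (acc : List String) :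
    bs.foldl (fun acc block => if tdClaudeBlock block then acc else acc ++ block) acc
      = acc ++ bs.flatMap tdG := by
  induction bs generalizing acc with
  | nil => simp
  | cons b bs ih => simp [tdG]; split <;> simp [ih]

-- invariant: A's running (filtered, skip) state corresponds to B's (blocks, current)
lemma tdCore (lines : List String) : ∀ (blocks : List (List String)) (current : List String),
    (lines.foldl tdStepA (blocks.flatMap tdG ++ tdG current, tdClaudeBlock current)).1
      = (lines.foldl tdStepB (blocks, current)).1.flatMap tdG
        ++ tdG (lines.foldl tdStepB (blocks, current)).2 := by
  induction lines with
  | nil => intro blocks current; simp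
  | cons line rest ih =>
    intro blocks current
    by_cases hb : PySem.Chars.startswith line.toList ['d','i','f','f',' ','-','-','g','i','t'] = true
    · by_cases hc : PySem.Chars.isIn ['/','.','c','l','a','u','d','e','/'] line.toList = true
      · have h1 : tdStepA (blocks.flatMap tdG ++ tdG current, tdClaudeBlock current) line
            = ((blocks ++ [current]).flatMap tdG ++ tdG [line], tdClaudeBlock [line]) := by
          simp [tdStepA, tdG, tdClaudeBlock, hb, hc]
        have h2 : tdStepB (blocks, current) line = (blocks ++ [current], [line]) := by
          simp [tdStepB, hb]
        simp only [List.foldl_cons, h1, h2]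
        exact ih (blocks ++ [current]) [line]
      · have h1 : tdStepA (blocks.flatMap tdG ++ tdG current, tdClaudeBlock current) line
            = ((blocks ++ [current]).flatMap tdG ++ tdG [line], tdClaudeBlock [line]) := by
          simp [tdStepA, tdG, tdClaudeBlock, hb, hc]
        have h2 : tdStepB (blocks, current) line = (blocks ++ [current], [line]) := by
          simp [tdStepB, hb]
        simp only [List.foldl_cons, h1, h2]
        exact ih (blocks ++ [current]) [line]
    · have hcb : tdClaudeBlock (current ++ [line]) = tdClaudeBlock current := by
        rw [tdClaudeBlock_append]
        cases current <;> simp [tdClaudeBlock, hb]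
      have h1 : tdStepA (blocks.flatMap tdG ++ tdG current, tdClaudeBlock current) line
          = (blocks.flatMap tdG ++ tdG (current ++ [line]), tdClaudeBlock (current ++ [line])) := by
        by_cases hcc : tdClaudeBlock current = true
        · simp [tdStepA, tdG, hb, hcb, hcc]
        · simp [tdStepA, tdG, hb, hcb, hcc]
      have h2 : tdStepB (blocks, current) line = (blocks, current ++ [line]) := by
        simp [tdStepB, hb]
      simp only [List.foldl_cons, h1, h2]
      exact ih blocks (current ++ [line])

-- ===== VERDICT (by name: the statement is the Claim_ definition above) =====
lemma tdG_nil : tdG [] = ([] : List String) := rfl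

lemma tdClaudeBlock_nil : tdClaudeBlock [] = false := rfl

theorem truncate_diff_py_spec : Claim_equal_truncate_diff_py := by
  intro diff max_chars _
  unfold Spec_truncate_diff_py truncate_diff_py truncate_diff_py_alt
  dsimp only
  have h := tdCore ((PySem.Str.split? diff "\n").getD []) [] []
  simp only [tdG_nil, tdClaudeBlock_nil, List.flatMap_nil, List.append_nil] at h
  rw [tdFilter_eq_flatMap]
  simp only [List.nil_append, List.flatMap_append, List.flatMap_cons, List.flatMap_nil, List.append_nil]
  rw [h]
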